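-- pv_equiv track=rewrite | github.com/AltmanD/guandan_mcc | rl-frame/actor_ppo/utils/utils.py | card2num
-- ===== SOURCE A (Python) =====
-- CardToNum = {
--     'H2':0, 'H3':1, 'H4':2, 'H5':3, 'H6':4, 'H7':5, 'H8':6, 'H9':7, 'HT':8, 'HJ':9, 'HQ':10, 'HK':11, 'HA':12,
--     'S2':13, 'S3':14, 'S4':15, 'S5':16, 'S6':17, 'S7':18, 'S8':19, 'S9':20, 'ST':21, 'SJ':22, 'SQ':23, 'SK':24, 'SA':25,
--     'C2':26, 'C3':27, 'C4':28, 'C5':29, 'C6':30, 'C7':31, 'C8':32, 'C9':33, 'CT':34, 'CJ':35, 'CQ':36, 'CK':37, 'CA':38,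
--     'D2':39, 'D3':40, 'D4':41, 'D5':42, 'D6':43, 'D7':44, 'D8':45, 'D9':46, 'DT':47, 'DJ':48, 'DQ':49, 'DK':50, 'DA':51,
--     'SB':52, 'HR':53
-- }
--
-- def card2num(list_cards):      # 将字符串转换成数字
--     res = []
--     if list_cards == None:
--         return res
--     if list_cards == -1:
--         return [-1]
--     for ele in list_cards:
--         if ele in CardToNum:
--             res.append(CardToNum[ele])
--     return res
-- ===== SOURCE B (Python) =====
-- def card2num(list_cards):
--     if list_cards == None:
--         return []
--     if list_cards == -1:
--         return [-1]
--     suits = "HSCD"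
--     ranks = "23456789TJQKA"
--     res = []
--     for ele in list_cards:
--         if ele == "SB":
--             res.append(52)
--         elif ele == "HR":
--             res.append(53)
--         elif len(ele) == 2 and ele[0] in suits and ele[1] in ranks:
--             res.append(suits.index(ele[0]) * 13 + ranks.index(ele[1]))
--     return res
-- ===== Notes on version B (the rewrite author's own statement) =====
-- stated objective: simpler
-- what changed: The 54-entry lookup table is replaced by a closed-form encoding: handle 'SB'/'HR' specially, otherwise validate a 2-character suit+rank string against 'HSCD' and '23456789TJQKA' and compute suit_index*13 + rank_index.
import Mathlib
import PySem

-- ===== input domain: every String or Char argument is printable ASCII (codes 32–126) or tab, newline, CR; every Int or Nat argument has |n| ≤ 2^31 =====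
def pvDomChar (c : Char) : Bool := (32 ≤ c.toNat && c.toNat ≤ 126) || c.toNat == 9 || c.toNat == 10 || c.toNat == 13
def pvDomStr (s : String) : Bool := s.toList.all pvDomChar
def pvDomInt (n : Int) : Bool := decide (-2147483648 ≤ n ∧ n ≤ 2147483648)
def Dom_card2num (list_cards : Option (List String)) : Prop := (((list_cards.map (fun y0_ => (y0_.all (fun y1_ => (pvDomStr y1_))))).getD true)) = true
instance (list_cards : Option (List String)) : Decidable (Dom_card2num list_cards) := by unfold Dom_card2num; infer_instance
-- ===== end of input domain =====

-- B replaces A's 54-entry lookup table by a closed-form suit*13+rank encoding (objective: simpler).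

-- ===== PORT A =====
-- the CardToNum dict literal (unique keys), as an insertion-ordered PySem.Dict
def CardToNum : PySem.Dict String Int := PySem.Dict.mk [("H2",0),("H3",1),("H4",2),("H5",3),("H6",4),("H7",5),("H8",6),("H9",7),("HT",8),("HJ",9),("HQ",10),("HK",11),("HA",12),("S2",13),("S3",14),("S4",15),("S5",16),("S6",17),("S7",18),("S8",19),("S9",20),("ST",21),("SJ",22),("SQ",23),("SK",24),("SA",25),("C2",26),("C3",27),("C4",28),("C5",29),("C6",30),("C7",31),("C8",32),("C9",33),("CT",34),("CJ",35),("CQ",36),("CK",37),("CA",38),("D2",39),("D3",40),("D4",41),("D5",42),("D6",43),("D7",44),("D8",45),("D9",46),("DT",47),("DJ",48),("DQ",49),("DK",50),("DA",51),("SB",52),("HR",53)]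

-- 'if list_cards == -1: return [-1]': under the type convention list_cards is an
-- Option (List String) and can never equal the integer -1, so that branch is statically dead.
-- 'if ele in CardToNum: res.append(CardToNum[ele])' is the match on get? below.
def card2num (list_cards : Option (List String)) : List Int :=
  match list_cards with
  | none => []
  | some l =>
    l.foldl (fun res ele =>
      match PySem.Dict.get? CardToNum ele with
      | some v => res ++ [v]
      | none => res) []

-- ===== PORT B =====
-- same dead '== -1' branch note as for A
def card2num_alt (list_cards : Option (List String)) : List Int :=
  match list_cards with
  | none => []
  | some l =>
    l.foldl (fun res ele =>
      if ele == "SB" then res ++ [(52 : Int)]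
      else if ele == "HR" then res ++ [(53 : Int)]
      else
        -- 'len(ele) == 2 and ele[0] in suits and ele[1] in ranks' via the char list
        match ele.toList with
        | [c1, c2] =>
          if c1 ∈ "HSCD".toList ∧ c2 ∈ "23456789TJQKA".toList then
            res ++ [(((PySem.List.index? "HSCD".toList c1).getD 0 : Int) * 13 +
                     ((PySem.List.index? "23456789TJQKA".toList c2).getD 0 : Int))]
          else res
        | _ => res) []

-- ===== PRECONDITION & SPEC =====
def Spec_card2num (list_cards : Option (List String)) (out : List Int) : Prop := out = card2num_alt list_cards
instance (list_cards : Option (List String)) (out : List Int) : Decidable (Spec_card2num list_cards out) := by unfold Spec_card2num; infer_instance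

-- ===== CLAIM (what is proved, stated in full; the proofs are below) =====
def Claim_equal_card2num : Prop := ∀ (list_cards : Option (List String)), Dom_card2num list_cards → Spec_card2num list_cards (card2num list_cards)

-- ===== LEMMAS AND PROOFS =====

-- per-element contribution of A's loop body
def contribA (ele : String) : List Int :=
  match PySem.Dict.get? CardToNum ele with
  | some v => [v]
  | none => []

-- per-element contribution of B's loop body
def contribB (ele : String) : List Int :=
  if ele == "SB" then [(52 : Int)]
  else if ele == "HR" then [(53 : Int)]
  else
    match ele.toList with
    | [c1, c2] =>
      if c1 ∈ "HSCD".toList ∧ c2 ∈ "23456789TJQKA".toList then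
        [(((PySem.List.index? "HSCD".toList c1).getD 0 : Int) * 13 +
          ((PySem.List.index? "23456789TJQKA".toList c2).getD 0 : Int))]
      else []
    | _ => []

-- the dict lookup misses whenever the first character is not a suit letter
lemma get?_none_of_bad_suit (c1 c2 : Char) (h1 : c1 ≠ 'H') (h2 : c1 ≠ 'S') (h3 : c1 ≠ 'C') (h4 : c1 ≠ 'D') :
    PySem.Dict.get? CardToNum (String.ofList [c1, c2]) = none := by
  simp [CardToNum, beq_iff_eq, ← String.toList_inj,
    (Ne.symm h1), (Ne.symm h2), (Ne.symm h3), (Ne.symm h4), PySem.Dict.get?]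

-- …or whenever the second character is not a rank letter nor 'B'/'R'
lemma get?_none_of_bad_rank (c1 c2 : Char)
    (h : c2 ∉ (['2','3','4','5','6','7','8','9','T','J','Q','K','A','B','R'] : List Char)) :
    PySem.Dict.get? CardToNum (String.ofList [c1, c2]) = none := by
  have hs : ∀ r ∈ (['2','3','4','5','6','7','8','9','T','J','Q','K','A','B','R'] : List Char), r ≠ c2 :=
    fun r hr heq => h (heq ▸ hr)
  simp [CardToNum, beq_iff_eq, ← String.toList_inj, PySem.Dict.get?,
    hs '2' (by decide), hs '3' (by decide), hs '4' (by decide), hs '5' (by decide),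
    hs '6' (by decide), hs '7' (by decide), hs '8' (by decide), hs '9' (by decide),
    hs 'T' (by decide), hs 'J' (by decide), hs 'Q' (by decide), hs 'K' (by decide),
    hs 'A' (by decide), hs 'B' (by decide), hs 'R' (by decide)]

-- …or whenever the string does not have exactly two characters
lemma get?_none_one (c : Char) : PySem.Dict.get? CardToNum (String.ofList [c]) = none := by
  simp [CardToNum, beq_iff_eq, ← String.toList_inj, PySem.Dict.get?]

lemma get?_none_long (c1 c2 c3 : Char) (t : List Char) :
    PySem.Dict.get? CardToNum (String.ofList (c1 :: c2 :: c3 :: t)) = none := by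
  simp [CardToNum, beq_iff_eq, ← String.toList_inj, PySem.Dict.get?]

lemma hsuits : "HSCD".toList = (['H','S','C','D'] : List Char) := by decide
lemma hranks : "23456789TJQKA".toList = (['2','3','4','5','6','7','8','9','T','J','Q','K','A'] : List Char) := by decide

-- the two per-element contributions agree on every string
lemma contrib_eq (ele : String) : contribA ele = contribB ele := by
  obtain ⟨cs, rfl⟩ : ∃ cs, ele = String.ofList cs := ⟨ele.toList, String.ofList_toList.symm⟩
  rcases cs with _ | ⟨c1, _ | ⟨c2, _ | ⟨c3, t⟩⟩⟩
  · decide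
  · simp [contribA, contribB, get?_none_one, String.toList_ofList, beq_iff_eq, ← String.toList_inj]
  · by_cases h1 : c1 ∈ (['H','S','C','D'] : List Char)
    · by_cases h2 : c2 ∈ (['2','3','4','5','6','7','8','9','T','J','Q','K','A','B','R'] : List Char)
      · fin_cases h1 <;> fin_cases h2 <;> decide
      · have hr : c2 ∉ (['2','3','4','5','6','7','8','9','T','J','Q','K','A'] : List Char) := by
          intro hm; exact h2 (by simp at hm ⊢; tauto)
        have hB : c2 ≠ 'B' := by intro hh; exact h2 (by simp [hh])
        have hR : c2 ≠ 'R' := by intro hh; exact h2 (by simp [hh])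
        simp [contribA, contribB, get?_none_of_bad_rank c1 c2 h2, beq_iff_eq,
          ← String.toList_inj, String.toList_ofList, hranks, hr, hB, hR]
    · have hH : c1 ≠ 'H' := by intro hh; exact h1 (by simp [hh])
      have hS : c1 ≠ 'S' := by intro hh; exact h1 (by simp [hh])
      have hC : c1 ≠ 'C' := by intro hh; exact h1 (by simp [hh])
      have hD : c1 ≠ 'D' := by intro hh; exact h1 (by simp [hh])
      simp [contribA, contribB, get?_none_of_bad_suit c1 c2 hH hS hC hD, beq_iff_eq,
        ← String.toList_inj, String.toList_ofList, hsuits, hH, hS, hC, hD]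
  · simp [contribA, contribB, get?_none_long, String.toList_ofList, beq_iff_eq, ← String.toList_inj]

-- folding the two loop bodies from any accumulator gives the same result
lemma fold_eq (l : List String) (res : List Int) :
    l.foldl (fun res ele =>
      match PySem.Dict.get? CardToNum ele with
      | some v => res ++ [v]
      | none => res) res =
    l.foldl (fun res ele =>
      if ele == "SB" then res ++ [(52 : Int)]
      else if ele == "HR" then res ++ [(53 : Int)]
      else
        match ele.toList with
        | [c1, c2] =>
          if c1 ∈ "HSCD".toList ∧ c2 ∈ "23456789TJQKA".toList then
            res ++ [(((PySem.List.index? "HSCD".toList c1).getD 0 : Int) * 13 +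
                     ((PySem.List.index? "23456789TJQKA".toList c2).getD 0 : Int))]
          else res
        | _ => res) res := by
  induction l generalizing res with
  | nil => rfl
  | cons ele t ih =>
    simp only [List.foldl_cons]
    rw [← ih]
    congr 1
    have hA : (match PySem.Dict.get? CardToNum ele with
        | some v => res ++ [v]
        | none => res) = res ++ contribA ele := by
      unfold contribA; cases PySem.Dict.get? CardToNum ele <;> simp
    have hB : (if ele == "SB" then res ++ [(52 : Int)]
      else if ele == "HR" then res ++ [(53 : Int)]
      else
        match ele.toList with
        | [c1, c2] =>
          if c1 ∈ "HSCD".toList ∧ c2 ∈ "23456789TJQKA".toList then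
            res ++ [(((PySem.List.index? "HSCD".toList c1).getD 0 : Int) * 13 +
                     ((PySem.List.index? "23456789TJQKA".toList c2).getD 0 : Int))]
          else res
        | _ => res) = res ++ contribB ele := by
      unfold contribB
      split_ifs with hsb hhr
      · rfl
      · rfl
      · rcases h : ele.toList with _ | ⟨a, _ | ⟨b, _ | ⟨c, t'⟩⟩⟩
        · simp
        · simp
        · simp only [h]; split_ifs <;> simp
        · simp
    rw [hA, hB, contrib_eq]

-- ===== VERDICT (by name: the statement is the Claim_ definition above) =====
theorem card2num_spec : Claim_equal_card2num := by
  intro list_cards _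
  unfold Spec_card2num card2num card2num_alt
  cases list_cards with
  | none => rfl
  | some l => exact fold_eq l []
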